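-- pv_equiv track=rewrite | github.com/icebear5h/clash-db | fix_all_columns.py | parse_sql_values
-- ===== SOURCE A (Python) =====
-- def parse_sql_values(line):
--     """Parse SQL VALUES row into individual values, handling quoted strings."""
--     values = []
--     current = []
--     in_quote = False
--     i = 0
--
--     # Remove opening ( and trailing ), or );
--     line = line.strip()
--     if line.startswith('('):
--         line = line[1:]
--     line = line.rstrip(',;\n')
--     if line.endswith(')'):
--         line = line[:-1]
--
--     while i < len(line):
--         char = line[i]
--
--         if char == "'" and not in_quote:
--             in_quote = True
--             current.append(char)
--         elif char == "'" and in_quote: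
--             # Check if it's an escaped quote
--             if i + 1 < len(line) and line[i + 1] == "'":
--                 current.append("''")
--                 i += 1
--             else:
--                 in_quote = False
--                 current.append(char)
--         elif char == ',' and not in_quote:
--             values.append(''.join(current).strip())
--             current = []
--         else:
--             current.append(char)
--
--         i += 1
--
--     if current:
--         values.append(''.join(current).strip())
--
--     return values
-- ===== SOURCE B (Python) =====
-- def parse_sql_values(line):
--     """Parse SQL VALUES row into individual values, handling quoted strings."""
--     # Same preprocessing as before
--     line = line.strip()
--     if line.startswith('('):
--         line = line[1:]
--     line = line.rstrip(',;\n')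
--     if line.endswith(')'):
--         line = line[:-1]
--
--     def quoted(s, i):
--         # consume a quoted-string body starting at s[i] (just after the opening quote),
--         # handling '' escapes; returns (consumed text including closing quote, next index)
--         out = []
--         n = len(s)
--         while i < n:
--             if s[i] == "'":
--                 if i + 1 < n and s[i + 1] == "'":
--                     out.append("''")
--                     i += 2
--                 else:
--                     out.append("'")
--                     return ''.join(out), i + 1
--             else:
--                 out.append(s[i])
--                 i += 1
--         return ''.join(out), i
--
--     values = []
--     buf = []
--     i = 0
--     n = len(line)
--     while i < n:
--         c = line[i]
--         i += 1
--         if c == ',':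
--             values.append(''.join(buf).strip())
--             buf = []
--         elif c == "'":
--             body, i = quoted(line, i)
--             buf.append("'" + body)
--         else:
--             buf.append(c)
--     if buf:
--         values.append(''.join(buf).strip())
--     return values
-- ===== Notes on version B (the rewrite author's own statement) =====
-- stated objective: simpler
-- what changed: A's single character-at-a-time state machine with an in_quote flag and manual i+1 lookahead is replaced by a tokenizing loop that, on an opening quote, hands off to a nested quoted-string consumer (handling '' escapes) and otherwise just splits on commas, eliminating the quote-state flag.
import Mathlib
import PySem

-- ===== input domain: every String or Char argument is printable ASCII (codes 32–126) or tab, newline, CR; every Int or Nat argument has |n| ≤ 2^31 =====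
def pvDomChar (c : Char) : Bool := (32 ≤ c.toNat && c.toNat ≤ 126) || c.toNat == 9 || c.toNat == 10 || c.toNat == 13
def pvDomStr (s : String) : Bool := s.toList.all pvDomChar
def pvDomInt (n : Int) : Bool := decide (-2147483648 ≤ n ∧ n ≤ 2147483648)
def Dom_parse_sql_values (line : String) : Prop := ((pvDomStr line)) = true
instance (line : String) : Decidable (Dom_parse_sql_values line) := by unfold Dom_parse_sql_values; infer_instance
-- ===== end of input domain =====

-- B replaces A's in_quote flag and manual lookahead by a nested quoted-string consumer
-- invoked on an opening quote (objective: simpler; same cost; same return values).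

-- shared by both ports: both Pythons begin with the identical four preprocessing lines
-- (strip, drop leading '(', rstrip ",;\n", drop trailing ')').
-- pvRstripSet is a hand port of Python str.rstrip(",;\n"): drop trailing chars of that set; exact.
def pvRstripSet (cs : List Char) : List Char :=
  (cs.reverse.dropWhile (fun c => c = ',' || c = ';' || c = '\n')).reverse

def pvClean (line : String) : List Char :=
  let l1 := (PySem.Str.strip line).toList
  let l2 := if PySem.Chars.startswith l1 ['('] then PySem.List.slice l1 (some 1) none else l1
  let l3 := pvRstripSet l2
  if PySem.Chars.endswith l3 [')'] then PySem.List.slice l3 none (some (-1)) else l3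

-- ===== PORT A =====
-- A's while loop over indices: remaining characters as a list, the 'line[i+1]' lookahead
-- as rest.head? (i+1 in range ∧ line[i+1] = quote), 'i += 1' extra skip as rest.tail.
def pvLoopA : List Char → List Char → Bool → List String → List String
  | [], current, _, values =>
      if current ≠ [] then values ++ [String.ofList (PySem.Chars.strip current)] else values
  | c :: rest, current, inq, values =>
      if c = '\'' ∧ ¬(inq = true) then
        pvLoopA rest (current ++ ['\'']) true values
      else if c = '\'' ∧ inq = true then
        if rest.head? = some '\'' then
          pvLoopA rest.tail (current ++ ['\'', '\'']) inq values
        else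
          pvLoopA rest (current ++ ['\'']) false values
      else if c = ',' ∧ ¬(inq = true) then
        pvLoopA rest [] inq (values ++ [String.ofList (PySem.Chars.strip current)])
      else
        pvLoopA rest (current ++ [c]) inq values
  termination_by cs _ _ _ => cs.length
  decreasing_by
    · simp
    · simp [List.length_tail]; try omega
    · simp
    · simp
    · simp

def parse_sql_values (line : String) : List String :=
  pvLoopA (pvClean line) [] false []

-- ===== PORT B =====
-- quoted(cs): consume a quoted-string body after the opening quote, handling '' escapes;
-- returns (consumed text including closing quote, remaining chars).
def pvQuotedB : List Char → List Char × List Char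
  | [] => ([], [])
  | c :: rest =>
      if c = '\'' then
        if rest.head? = some '\'' then
          let p := pvQuotedB rest.tail
          ('\'' :: '\'' :: p.1, p.2)
        else (['\''], rest)
      else
        let p := pvQuotedB rest
        (c :: p.1, p.2)
  termination_by cs => cs.length
  decreasing_by
    · simp [List.length_tail]; try omega
    · simp

theorem pvQuotedB_snd_length : ∀ (n : Nat) (cs : List Char), cs.length ≤ n →
    (pvQuotedB cs).2.length ≤ cs.length := by
  intro n
  induction n with
  | zero =>
      intro cs hcs
      have : cs = [] := List.eq_nil_of_length_eq_zero (Nat.le_zero.mp hcs)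
      subst this; simp [pvQuotedB]
  | succ n ih =>
      intro cs hcs
      cases cs with
      | nil => simp [pvQuotedB]
      | cons c rest =>
        have hrest : rest.length ≤ n := by simpa using Nat.lt_succ_iff.mp (by simpa using hcs)
        have htail : rest.tail.length ≤ n := le_trans (by simp [List.length_tail]; try omega) hrest
        simp only [pvQuotedB]
        split_ifs with h1 h2
        · have := ih rest.tail htail
          simp only [List.length_cons]
          have : rest.tail.length + 1 ≤ rest.length + 1 := by simp [List.length_tail]; try omega
          calc (pvQuotedB rest.tail).2.length ≤ rest.tail.length := ih rest.tail htail
            _ ≤ rest.length + 1 := by simp [List.length_tail]; try omega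
        · simp
        · calc (pvQuotedB rest).2.length ≤ rest.length := ih rest hrest
            _ ≤ rest.length + 1 := by omega

def pvLoopB : List Char → List Char → List String → List String
  | [], buf, values =>
      if buf ≠ [] then values ++ [String.ofList (PySem.Chars.strip buf)] else values
  | c :: rest, buf, values =>
      if c = ',' then
        pvLoopB rest [] (values ++ [String.ofList (PySem.Chars.strip buf)])
      else if c = '\'' then
        let p := pvQuotedB rest
        pvLoopB p.2 (buf ++ '\'' :: p.1) values
      else
        pvLoopB rest (buf ++ [c]) values
  termination_by cs _ _ => cs.length
  decreasing_by
    · simp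
    · have := pvQuotedB_snd_length rest.length rest le_rfl
      simp; omega
    · simp

def parse_sql_values_alt (line : String) : List String :=
  pvLoopB (pvClean line) [] []

-- ===== PRECONDITION & SPEC =====
def Spec_parse_sql_values (line : String) (out : List String) : Prop := out = parse_sql_values_alt line
instance (line : String) (out : List String) : Decidable (Spec_parse_sql_values line out) := by unfold Spec_parse_sql_values; infer_instance

-- ===== CLAIM (what is proved, stated in full; the proofs are below) =====
def Claim_equal_parse_sql_values : Prop := ∀ (line : String), Dom_parse_sql_values line → Spec_parse_sql_values line (parse_sql_values line)

-- ===== LEMMAS AND PROOFS =====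

-- Joint invariant: outside a quote A's loop is B's loop; inside a quote A's loop first
-- plays out pvQuotedB on the rest and then continues as B's loop on the remainder.
theorem pvLoop_eq : ∀ (n : Nat) (cs : List Char), cs.length ≤ n → ∀ cur vals,
    (pvLoopA cs cur false vals = pvLoopB cs cur vals) ∧
    (pvLoopA cs cur true vals =
      pvLoopB (pvQuotedB cs).2 (cur ++ (pvQuotedB cs).1) vals) := by
  intro n
  induction n with
  | zero =>
      intro cs hcs cur vals
      have : cs = [] := List.eq_nil_of_length_eq_zero (Nat.le_zero.mp hcs)
      subst this
      constructor <;> simp [pvLoopA, pvLoopB, pvQuotedB]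
  | succ n ih =>
      intro cs hcs cur vals
      cases cs with
      | nil => constructor <;> simp [pvLoopA, pvLoopB, pvQuotedB]
      | cons c rest =>
        have hrest : rest.length ≤ n := by simpa using Nat.lt_succ_iff.mp (by simpa using hcs)
        have htail : rest.tail.length ≤ n := le_trans (by simp [List.length_tail]; try omega) hrest
        constructor
        · -- outside a quote
          by_cases hq : c = '\''
          · subst hq
            have h1 := (ih rest hrest (cur ++ ['\'']) vals).2
            simp [pvLoopA, pvLoopB]
            simpa [List.append_assoc] using h1
          · by_cases hc : c = ','
            · subst hc
              have h1 := (ih rest hrest [] (vals ++ [String.ofList (PySem.Chars.strip cur)])).1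
              simp [pvLoopA, pvLoopB]
              exact h1
            · have h1 := (ih rest hrest (cur ++ [c]) vals).1
              simp [pvLoopA, pvLoopB, hq, hc]
              exact h1
        · -- inside a quote
          by_cases hq : c = '\''
          · subst hq
            by_cases hh : rest.head? = some '\''
            · have h1 := (ih rest.tail htail (cur ++ ['\'', '\'']) vals).2
              simp [pvLoopA, pvQuotedB, hh]
              simpa [List.append_assoc] using h1
            · have h1 := (ih rest hrest (cur ++ ['\'']) vals).1
              simp [pvLoopA, pvQuotedB, hh]
              exact h1
          · have h1 := (ih rest hrest (cur ++ [c]) vals).2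
            simp [pvLoopA, pvQuotedB, hq]
            simpa [List.append_assoc] using h1

-- ===== VERDICT (by name: the statement is the Claim_ definition above) =====
theorem parse_sql_values_spec : Claim_equal_parse_sql_values := by
  intro line _
  unfold Spec_parse_sql_values parse_sql_values parse_sql_values_alt
  exact (pvLoop_eq (pvClean line).length (pvClean line) le_rfl [] []).1
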